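-- pv_equiv track=rewrite | github.com/SwissTPH/pyfhirsdc | pyfhirsdc/converters/profileConverter.py | check_slice_siblings
-- ===== SOURCE A (Python) =====
-- def check_slice_siblings(siblings_list, element_list, i):
--     if i == len(element_list):
--         return siblings_list, i
--     current_element = element_list[i]
--     if not 'sliceName' in current_element.keys():
--         return siblings_list, i
--     elif 'sliceName' in current_element.keys():
--         siblings_list.append(current_element)
--         return check_slice_siblings(siblings_list, element_list, i+1)
--     elif i == len(element_list):
--         return siblings_list, i
-- ===== SOURCE B (Python) =====
-- def check_slice_siblings(siblings_list, element_list, i):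
--     j = i
--     n = len(element_list)
--     while j < n and 'sliceName' in element_list[j]:
--         j += 1
--     siblings_list.extend(element_list[k] for k in range(i, j))
--     return siblings_list, j
-- ===== Notes on version B (the rewrite author's own statement) =====
-- stated objective: simpler
-- what changed: Replaces the tail recursion that appends one element per call with a two-phase iteration: first a plain while loop advances an index j past the run of elements containing 'sliceName', then the run element_list[i:j] is appended in one bulk extend.
import Mathlib
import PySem

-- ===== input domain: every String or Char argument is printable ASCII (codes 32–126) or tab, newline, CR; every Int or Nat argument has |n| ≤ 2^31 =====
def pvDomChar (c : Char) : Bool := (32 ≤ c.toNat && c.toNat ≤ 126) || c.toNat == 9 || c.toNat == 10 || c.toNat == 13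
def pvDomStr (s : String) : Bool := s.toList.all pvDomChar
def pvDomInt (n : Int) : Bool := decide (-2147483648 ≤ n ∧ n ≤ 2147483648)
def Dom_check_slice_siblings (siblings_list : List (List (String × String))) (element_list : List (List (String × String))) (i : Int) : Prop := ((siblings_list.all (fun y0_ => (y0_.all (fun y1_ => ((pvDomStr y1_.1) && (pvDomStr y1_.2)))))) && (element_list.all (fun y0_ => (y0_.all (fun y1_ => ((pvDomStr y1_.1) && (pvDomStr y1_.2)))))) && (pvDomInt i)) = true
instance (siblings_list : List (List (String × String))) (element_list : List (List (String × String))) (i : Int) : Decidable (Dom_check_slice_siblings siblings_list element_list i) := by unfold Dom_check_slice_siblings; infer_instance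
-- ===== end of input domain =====

-- B replaces A's tail recursion by a two-phase loop (find the stopping index, then bulk-append the run); same return value and same appended elements on Pre_.


-- ===== PORT A =====
-- literal transliteration of A's tail recursion; 'element_list[i]' is pyGet?, none = IndexError (excluded by Pre_; dummy value there)
def check_slice_siblings (siblings_list : List (List (String × String))) (element_list : List (List (String × String))) (i : Int) : (List (List (String × String))) × Int :=
  if i = (element_list.length : Int) then (siblings_list, i)
  else
    match h : PySem.List.pyGet? element_list i with
    | none => (siblings_list, i)  -- Python raises IndexError here; outside Pre_
    | some current_element =>
      if current_element.any (fun kv => kv.1 == "sliceName") then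
        check_slice_siblings (siblings_list ++ [current_element]) element_list (i + 1)
      else (siblings_list, i)
termination_by (element_list.length - i).toNat
decreasing_by
  have hin : PySem.Raise.InRange element_list.length i := by
    by_contra hc
    rw [← PySem.List.pyGet?_eq_none_iff] at hc
    simp [h] at hc
  simp only [PySem.Raise.InRange] at hin
  omega

-- ===== PORT B =====
-- while loop of Source B: advance j while j < n and element_list[j] has key 'sliceName'
def altStop (element_list : List (List (String × String))) (j : Int) : Int :=
  if h : j < (element_list.length : Int) ∧
      ((PySem.List.pyGet? element_list j).getD []).any (fun kv => kv.1 == "sliceName") then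
    altStop element_list (j + 1)
  else j
termination_by (element_list.length - j).toNat
decreasing_by omega

-- bulk extend with element_list[k] for k in range(i, j), then return (siblings_list, j)
def check_slice_siblings_alt (siblings_list : List (List (String × String))) (element_list : List (List (String × String))) (i : Int) : (List (List (String × String))) × Int :=
  let j := altStop element_list i
  (siblings_list ++ (PySem.List.pyRange i j 1).map (fun k => (PySem.List.pyGet? element_list k).getD []), j)

-- ===== PRECONDITION & SPEC =====
-- A raises IndexError when i < -len(element_list) or i > len(element_list); exactly those inputs are excluded.
def Pre_check_slice_siblings (siblings_list : List (List (String × String))) (element_list : List (List (String × String))) (i : Int) : Prop :=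
  -(element_list.length : Int) ≤ i ∧ i ≤ (element_list.length : Int)
instance (siblings_list : List (List (String × String))) (element_list : List (List (String × String))) (i : Int) : Decidable (Pre_check_slice_siblings siblings_list element_list i) := by unfold Pre_check_slice_siblings; infer_instance

def pvWitness_check_slice_siblings : (List (List (String × String))) × (List (List (String × String))) × Int :=
  ([], [[("sliceName", "a")]], 0)

def Spec_check_slice_siblings (siblings_list : List (List (String × String))) (element_list : List (List (String × String))) (i : Int) (out : (List (List (String × String))) × Int) : Prop := out = check_slice_siblings_alt siblings_list element_list i
instance (siblings_list : List (List (String × String))) (element_list : List (List (String × String))) (i : Int) (out : (List (List (String × String))) × Int) : Decidable (Spec_check_slice_siblings siblings_list element_list i out) := by unfold Spec_check_slice_siblings; infer_instance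

-- ===== CLAIM (what is proved, stated in full; the proofs are below) =====
def Claim_equal_check_slice_siblings : Prop := ∀ (siblings_list : List (List (String × String))) (element_list : List (List (String × String))) (i : Int), Dom_check_slice_siblings siblings_list element_list i → Pre_check_slice_siblings siblings_list element_list i → Spec_check_slice_siblings siblings_list element_list i (check_slice_siblings siblings_list element_list i)

-- ===== LEMMAS AND PROOFS =====

-- the while loop never moves the index backwards
theorem altStop_ge (element_list : List (List (String × String))) (j : Int) : j ≤ altStop element_list j := by
  rw [altStop]
  split
  · have := altStop_ge element_list (j + 1)
    omega
  · exact le_refl j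
termination_by (element_list.length - j).toNat
decreasing_by omega

theorem main_lemma (element_list : List (List (String × String))) :
    ∀ (m : Nat) (siblings_list : List (List (String × String))) (i : Int),
      -(element_list.length : Int) ≤ i → i ≤ (element_list.length : Int) →
      ((element_list.length : Int) - i).toNat = m →
      check_slice_siblings siblings_list element_list i = check_slice_siblings_alt siblings_list element_list i := by
  intro m
  induction m with
  | zero =>
    intro s i h1 h2 hm
    have hi : i = (element_list.length : Int) := by omega
    rw [check_slice_siblings, if_pos hi]
    rw [check_slice_siblings_alt]
    have hstop : altStop element_list i = i := by
      rw [altStop, dif_neg]; intro ⟨h, _⟩; omega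
    simp [hstop, PySem.List.pyRange_one_eq_nil (le_refl i)]
  | succ m ih =>
    intro s i h1 h2 hm
    have hlt : i < (element_list.length : Int) := by omega
    have hin : PySem.Raise.InRange element_list.length i := by
      simp only [PySem.Raise.InRange]; omega
    rw [check_slice_siblings, if_neg (by omega)]
    split
    case _ hg => rw [PySem.List.pyGet?_eq_none_iff] at hg; exact absurd hin hg
    case _ cur hcur =>
    by_cases hk : cur.any (fun kv => kv.1 == "sliceName") = true
    · simp only [hk, if_true]
      rw [ih (s ++ [cur]) (i + 1) (by omega) (by omega) (by omega)]
      -- now show B (s ++ [cur]) (i+1) = B s i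
      rw [check_slice_siblings_alt, check_slice_siblings_alt]
      have hstep : altStop element_list i = altStop element_list (i + 1) := by
        rw [altStop, dif_pos ⟨hlt, by simp [hcur, hk]⟩]
      have hge : i + 1 ≤ altStop element_list (i + 1) := altStop_ge element_list (i + 1)
      simp only [hstep]
      conv_rhs => rw [PySem.List.pyRange_one_cons (show i < altStop element_list (i + 1) by omega)]
      simp [hcur]
    · simp only [hk]
      rw [check_slice_siblings_alt]
      have hstop : altStop element_list i = i := by
        rw [altStop, dif_neg]
        intro ⟨_, hb⟩
        rw [hcur] at hb
        exact hk hb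
      simp [hstop, PySem.List.pyRange_one_eq_nil (le_refl i)]

-- ===== VERDICT (by name: the statement is the Claim_ definition above) =====
theorem check_slice_siblings_spec : Claim_equal_check_slice_siblings := by
  intro s e i _ hpre
  unfold Spec_check_slice_siblings
  exact main_lemma e _ s i hpre.1 hpre.2 rfl
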